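-- pv_equiv track=rewrite | github.com/praneethr1000/python-75-hackathon | assin10.py | pendulum
-- ===== SOURCE A (Python) =====
-- def pendulum(x):
--     y=sorted(x)
--     n=len(x)
--     c=(n-1)//2
--     for i in range(1,len(x)+1):
--         if i%2 !=0:
--             x[c]=y[i-1]
--             c+=i
--         else:
--             x[c]=y[i-1]
--             c-=i
--     return x
-- ===== SOURCE B (Python) =====
-- def pendulum(x):
--     if not x:
--         return x
--     y = sorted(x)
--     x[:] = y[2::2][::-1] + [y[0]] + y[1::2]
--     return x
-- ===== Notes on version B (the rewrite author's own statement) =====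
-- stated objective: simpler
-- what changed: Replaces the index-jumping write loop (center, then alternating +i/-i offsets) by a direct closed-form construction: reversed even-indexed tail slice + minimum + odd-indexed slice, assigned back in place.
import Mathlib
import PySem

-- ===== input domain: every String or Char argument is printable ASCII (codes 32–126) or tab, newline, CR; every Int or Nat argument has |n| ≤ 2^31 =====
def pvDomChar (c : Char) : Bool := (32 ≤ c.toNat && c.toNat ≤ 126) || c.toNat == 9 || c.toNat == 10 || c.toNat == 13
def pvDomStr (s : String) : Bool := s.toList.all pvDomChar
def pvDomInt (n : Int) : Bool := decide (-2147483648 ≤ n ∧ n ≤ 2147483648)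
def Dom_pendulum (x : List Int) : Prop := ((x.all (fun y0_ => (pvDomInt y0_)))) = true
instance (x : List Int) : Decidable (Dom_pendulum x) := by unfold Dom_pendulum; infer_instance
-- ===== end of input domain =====

-- B replaces A's index-jumping write loop by a direct closed-form slice construction
-- (reversed even-indexed tail + minimum + odd-indexed slice); same return value, same
-- in-place mutation of the argument; objective: simpler.


-- ===== PORT A =====
-- the body of A's for-loop: x[c]=y[i-1]; c+=i (i odd) / c-=i (i even)
def pendStep (y : List Int) (st : List Int × Int) (i : Int) : List Int × Int :=
  if PySem.Int.mod i 2 ≠ 0 then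
    (PySem.List.pySetD st.1 st.2 (PySem.List.pyGetD y (i - 1) 0), st.2 + i)
  else
    (PySem.List.pySetD st.1 st.2 (PySem.List.pyGetD y (i - 1) 0), st.2 - i)

def pendulum (x : List Int) : List Int :=
  let y := PySem.List.sorted x id false
  let n : Int := x.length
  let c : Int := PySem.Int.floordiv (n - 1) 2
  ((PySem.List.pyRange 1 (n + 1) 1).foldl (pendStep y) (x, c)).1

-- ===== PORT B =====
def pendulum_alt (x : List Int) : List Int :=
  if x = [] then x
  else
    let y := PySem.List.sorted x id false
    let ev := (PySem.List.slice? y (some 2) none 2).getD []      -- y[2::2]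
    let evr := (PySem.List.slice? ev none none (-1)).getD []     -- [::-1]
    let od := (PySem.List.slice? y (some 1) none 2).getD []      -- y[1::2]
    evr ++ [PySem.List.pyGetD y 0 0] ++ od

-- ===== PRECONDITION & SPEC =====
def Spec_pendulum (x : List Int) (out : List Int) : Prop := out = pendulum_alt x
instance (x : List Int) (out : List Int) : Decidable (Spec_pendulum x out) := by unfold Spec_pendulum; infer_instance

-- ===== CLAIM (what is proved, stated in full; the proofs are below) =====
def Claim_equal_pendulum : Prop := ∀ (x : List Int), Dom_pendulum x → Spec_pendulum x (pendulum x)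

-- ===== LEMMAS AND PROOFS =====

-- every other element of a list, starting with the first (indices 0,2,4,...)
def everyOther : List Int → List Int
  | [] => []
  | [a] => [a]
  | a :: _ :: t => a :: everyOther t

-- the pendulum arrangement of a sorted list z
def pend (z : List Int) : List Int :=
  (everyOther (z.drop 2)).reverse ++ z.take 1 ++ everyOther (z.drop 1)

lemma everyOther_length (l : List Int) : (everyOther l).length = (l.length + 1) / 2 := by
  induction l using everyOther.induct with
  | case1 => simp [everyOther]
  | case2 a => simp [everyOther]
  | case3 a b t ih => simp [everyOther, ih]; omega

lemma everyOther_append_even (l : List Int) (a : Int) (h : l.length % 2 = 0) :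
    everyOther (l ++ [a]) = everyOther l ++ [a] := by
  induction l using everyOther.induct with
  | case1 => simp [everyOther]
  | case2 b => simp at h
  | case3 b c t ih =>
    simpa [everyOther] using ih (by simp only [List.length_cons] at h; omega)

lemma everyOther_append_odd (l : List Int) (a : Int) (h : l.length % 2 = 1) :
    everyOther (l ++ [a]) = everyOther l := by
  induction l using everyOther.induct with
  | case1 => simp at h
  | case2 b => simp [everyOther]
  | case3 b c t ih =>
    simpa [everyOther] using ih (by simp only [List.length_cons] at h; omega)

lemma pend_length (z : List Int) : (pend z).length = z.length := by
  simp [pend, everyOther_length]; omega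

lemma pend_append_even (z : List Int) (a : Int) (h : z.length % 2 = 0) :
    pend (z ++ [a]) = a :: pend z := by
  rcases z with _ | ⟨b, z⟩
  · simp [pend, everyOther]
  · have h2 : 2 ≤ (b :: z).length := by simp at h ⊢; omega
    unfold pend
    rw [List.drop_append_of_le_length h2, List.drop_append_of_le_length (by omega),
        List.take_append_of_le_length (by omega),
        everyOther_append_even _ _ (by simp at h ⊢; omega),
        everyOther_append_odd _ _ (by simp at h ⊢; omega)]
    simp

lemma pend_append_odd (z : List Int) (a : Int) (h : z.length % 2 = 1) :
    pend (z ++ [a]) = pend z ++ [a] := by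
  rcases z with _ | ⟨b, z⟩
  · simp at h
  · rcases z with _ | ⟨c, z⟩
    · simp [pend, everyOther]
    · have h2 : 2 ≤ (b :: c :: z).length := by simp
      unfold pend
      rw [List.drop_append_of_le_length h2, List.drop_append_of_le_length (by omega),
          List.take_append_of_le_length (by omega),
          everyOther_append_odd _ _ (by simp at h ⊢; omega),
          everyOther_append_even _ _ (by simp at h ⊢; omega)]
      simp

lemma filterMap_everyOther (l : List Int) :
    List.filterMap (fun k => l[2*k]?) (List.range ((l.length + 1) / 2)) = everyOther l := by
  induction l using everyOther.induct with
  | case1 => simp [everyOther]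
  | case2 a => simp [everyOther]
  | case3 a b t ih =>
    have hc : ((a :: b :: t).length + 1) / 2 = (t.length + 1) / 2 + 1 := by simp; omega
    rw [hc, List.range_succ_eq_map, List.filterMap_cons, List.filterMap_map]
    have hfun : ∀ k ∈ List.range ((t.length + 1) / 2),
        ((fun k => (a :: b :: t)[2*k]?) ∘ Nat.succ) k = t[2*k]? := by
      intro k _
      have : 2 * Nat.succ k = (2*k) + 1 + 1 := by omega
      simp [this]
    rw [List.filterMap_congr hfun]
    simp [everyOther, ih]

-- y[a::2] is every other element of y.drop a (exact port of the extended slice)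
lemma slice?_step2 (xs : List Int) (a : Nat) :
    PySem.List.slice? xs (some (a : Int)) none 2 = some (everyOther (xs.drop a)) := by
  by_cases hle : a ≤ xs.length
  · simp only [PySem.List.slice?, PySem.List.sliceIndices]
    norm_num
    have hstart : min (a:Int) (xs.length:Int) = a := by omega
    rw [hstart]
    by_cases hlt : (a:Int) < xs.length
    · have h0 : ¬((a:Int) < 0) := by omega
      simp only [if_neg h0, if_pos hlt]
      have hcnt : (((xs.length:Int) - a + 2 - 1) / 2).toNat = ((xs.drop a).length + 1) / 2 := by
        simp [List.length_drop]; omega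
      rw [hcnt, ← filterMap_everyOther (xs.drop a)]
      apply List.filterMap_congr
      intro k _
      have h1 : ((a:Int) + 2 * (k:Int)).toNat = a + 2*k := by omega
      rw [h1, List.getElem?_drop]
    · have hax : a = xs.length := by omega
      subst hax
      have h0 : ¬((xs.length:Int) < 0) := by omega
      simp [h0, everyOther]
  · simp only [PySem.List.slice?, PySem.List.sliceIndices]
    norm_num
    have hstart : min (a:Int) (xs.length:Int) = xs.length := by omega
    rw [hstart]
    have hd : List.drop a xs = [] := by
      rw [List.drop_eq_nil_iff]; omega
    have h0 : ¬((a:Int) < 0) := by omega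
    simp [hd, h0, everyOther]

-- closed form for A's cursor after m steps
def curs (n m : Nat) : Int :=
  if m % 2 = 0 then (((n - 1) / 2 : Nat) : Int) - ((m / 2 : Nat) : Int)
  else (((n - 1) / 2 : Nat) : Int) + (((m + 1) / 2 : Nat) : Int)

-- left boundary of the block written during the first m steps
def lb (n m : Nat) : Nat := (n - 1) / 2 - (m - 1) / 2

-- writing at the last slot of a prefix
lemma set_take_last (x : List Int) (L : Nat) (v : Int) (h1 : 1 ≤ L) (h2 : L ≤ x.length) :
    (x.take L).set (L - 1) v = x.take (L - 1) ++ [v] := by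
  obtain ⟨K, rfl⟩ := Nat.exists_eq_add_of_le h1
  simp only [show 1 + K = K + 1 by omega, Nat.add_sub_cancel]
  rw [List.take_add_one, List.getElem?_eq_getElem (by omega)]
  rw [List.set_append]
  simp [Nat.min_eq_left (show K ≤ x.length by omega)]

-- the loop invariant of A: after the first m iterations the list is the original with a
-- middle block replaced by the pendulum arrangement of the first m sorted values
lemma loop_inv (x y : List Int) (hy : y.length = x.length) (hx : x ≠ [])
    (m : Nat) (hm : m ≤ x.length) :
    (PySem.List.pyRange 1 ((m : Int) + 1) 1).foldl (pendStep y)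
        (x, (((x.length - 1) / 2 : Nat) : Int)) =
      (x.take (lb x.length m) ++ pend (y.take m) ++ x.drop (lb x.length m + m),
       curs x.length m) := by
  have hn : 1 ≤ x.length := List.length_pos_iff.mpr hx
  induction m with
  | zero =>
    rw [show ((0:Nat):Int) + 1 = 1 by norm_num, PySem.List.pyRange_one_eq_nil le_rfl]
    simp only [List.foldl_nil, List.take_zero]
    have hlb : lb x.length 0 = (x.length - 1) / 2 := by unfold lb; omega
    have hcurs : curs x.length 0 = (((x.length - 1) / 2 : Nat) : Int) := by
      unfold curs; norm_num
    rw [hlb, hcurs]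
    simp [pend, everyOther, List.take_append_drop]
  | succ m ih =>
    have hmn : m ≤ x.length := by omega
    have hmy : m < y.length := by omega
    have hstep1 : ((((m+1):Nat)):Int) + 1 = ((m:Int) + 1) + 1 := by push_cast; ring
    rw [hstep1, PySem.List.pyRange_one_succ_right (by omega), List.foldl_append, ih hmn]
    simp only [List.foldl_cons, List.foldl_nil]
    -- the single step i = m+1
    have hmod : PySem.Int.mod ((m:Int)+1) 2 = (((m+1) % 2 : Nat) : Int) := by
      simp [PySem.Int.mod, Int.fmod_eq_emod]
    have hget : PySem.List.pyGetD y ((m:Int) + 1 - 1) 0 = y.getD m 0 := by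
      rw [show (m:Int) + 1 - 1 = ((m:Nat):Int) by ring, PySem.List.pyGetD_natCast]
    have hyget : y.getD m 0 = y[m]'hmy := List.getD_eq_getElem y 0 hmy
    have htake : y.take (m+1) = y.take m ++ [y[m]'hmy] := by
      rw [List.take_add_one, List.getElem?_eq_getElem hmy]
      simp
    have hpre : (x.take (lb x.length m)).length = lb x.length m := by
      rw [List.length_take]; unfold lb; omega
    have hmid : (pend (y.take m)).length = m := by
      rw [pend_length, List.length_take]; omega
    by_cases hpar : m % 2 = 0
    · -- i = m+1 odd: write at the left edge, cursor jumps right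
      have hcond : (((m+1) % 2 : Nat) : Int) ≠ 0 := by omega
      unfold pendStep
      rw [hmod, if_pos hcond, hget]
      have hc : curs x.length m = (((x.length - 1) / 2 - m / 2 : Nat) : Int) := by
        unfold curs; rw [if_pos hpar]; omega
      rw [hc, PySem.List.pySetD_natCast]
      have hpend : pend (y.take (m+1)) = y.getD m 0 :: pend (y.take m) := by
        rw [hyget, htake]
        exact pend_append_even _ _ (by rw [List.length_take]; omega)
      simp only [Prod.mk.injEq]
      constructor
      · rcases Nat.eq_zero_or_pos m with hm0 | hmpos
        · subst hm0
          have hp : (x.length - 1) / 2 - 0 / 2 = lb x.length 0 := by unfold lb; omega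
          rw [hp]
          have hmid0 : pend (y.take 0) = [] := by simp [pend, everyOther]
          rw [hmid0]
          simp only [List.append_nil]
          rw [List.set_append]
          rw [if_neg (by rw [hpre]; omega)]
          rw [hpre]
          have hdrop : x.drop (lb x.length 0 + 0) =
              x[lb x.length 0]'(by unfold lb; omega) :: x.drop (lb x.length 0 + 1) := by
            rw [Nat.add_zero, List.drop_eq_getElem_cons]
          rw [hdrop]
          simp only [Nat.sub_self, List.set_cons_zero]
          rw [hpend]
          have hlb1 : lb x.length 1 = lb x.length 0 := by unfold lb; omega
          simp [hlb1, pend, everyOther]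
        · -- m even, m ≥ 2: write into the last slot of the prefix
          have hm2 : 2 ≤ m := by omega
          have hLlb : (x.length - 1) / 2 - m / 2 = lb x.length m - 1 := by unfold lb; omega
          have hlb1 : 1 ≤ lb x.length m := by unfold lb; omega
          have hlbn : lb x.length m ≤ x.length := by unfold lb; omega
          rw [hLlb, List.append_assoc, List.set_append,
              if_pos (by rw [hpre]; omega), set_take_last x _ _ hlb1 hlbn]
          rw [hpend]
          have hlb2 : lb x.length (m+1) = lb x.length m - 1 := by unfold lb; omega
          have hdr : lb x.length (m+1) + (m+1) = lb x.length m + m := by unfold lb; omega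
          rw [hdr, hlb2]
          simp [List.append_assoc]
      · unfold curs
        rw [if_neg (show ¬((m+1) % 2 = 0) by omega)]
        push_cast
        omega
    · -- i = m+1 even: write just past the block, cursor jumps left
      have hcond : ¬ ((((m+1) % 2 : Nat) : Int) ≠ 0) := by omega
      unfold pendStep
      rw [hmod, if_neg hcond, hget]
      have hc : curs x.length m = ((lb x.length m + m : Nat) : Int) := by
        unfold curs lb; rw [if_neg hpar]; omega
      rw [hc, PySem.List.pySetD_natCast]
      have hpend : pend (y.take (m+1)) = pend (y.take m) ++ [y.getD m 0] := by
        rw [hyget, htake]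
        exact pend_append_odd _ _ (by rw [List.length_take]; omega)
      simp only [Prod.mk.injEq]
      constructor
      · rw [List.append_assoc, List.set_append, if_neg (by rw [hpre]; omega), hpre,
            List.set_append, if_neg (by rw [hmid]; omega), hmid]
        have hsub : lb x.length m + m - lb x.length m - m = 0 := by omega
        have hlt : lb x.length m + m < x.length := by unfold lb; omega
        have hdrop : x.drop (lb x.length m + m) =
            x[lb x.length m + m]'hlt :: x.drop (lb x.length m + m + 1) := by
          rw [List.drop_eq_getElem_cons]
        rw [hsub, hdrop, List.set_cons_zero, hpend]
        have hlb2 : lb x.length (m+1) = lb x.length m := by unfold lb; omega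
        rw [hlb2, show lb x.length m + (m+1) = lb x.length m + m + 1 from by omega]
        simp [List.append_assoc]
      · unfold curs lb
        rw [if_pos (show (m+1) % 2 = 0 by omega)]
        push_cast
        omega

lemma pendulum_alt_eq_pend (x : List Int) (hx : x ≠ []) :
    pendulum_alt x = pend (PySem.List.sorted x id false) := by
  have hy : (PySem.List.sorted x id false).length = x.length := PySem.List.length_sorted x id false
  have hynil : PySem.List.sorted x id false ≠ [] := by
    intro h; apply hx; rwa [← List.length_eq_zero_iff, hy, List.length_eq_zero_iff] at h
  rw [pendulum_alt, if_neg hx]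
  show (PySem.List.slice? ((PySem.List.slice? (PySem.List.sorted x id false) (some 2) none 2).getD []) none none (-1)).getD []
      ++ [PySem.List.pyGetD (PySem.List.sorted x id false) 0 0]
      ++ (PySem.List.slice? (PySem.List.sorted x id false) (some 1) none 2).getD []
      = pend (PySem.List.sorted x id false)
  have h2 : PySem.List.slice? (PySem.List.sorted x id false) (some 2) none 2 =
      some (everyOther ((PySem.List.sorted x id false).drop 2)) := by
    simpa using slice?_step2 (PySem.List.sorted x id false) 2
  have h1 : PySem.List.slice? (PySem.List.sorted x id false) (some 1) none 2 =
      some (everyOther ((PySem.List.sorted x id false).drop 1)) := by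
    simpa using slice?_step2 (PySem.List.sorted x id false) 1
  rw [h2, h1]
  simp only [Option.getD_some, PySem.List.slice?_none_none_neg_one]
  have htk : (PySem.List.sorted x id false).take 1 = [PySem.List.pyGetD (PySem.List.sorted x id false) 0 0] := by
    rcases hsy : PySem.List.sorted x id false with _ | ⟨b, t⟩
    · exact absurd hsy hynil
    · simp [PySem.List.pyGetD]
  unfold pend
  rw [htk]

-- ===== VERDICT (by name: the statement is the Claim_ definition above) =====
theorem pendulum_spec : Claim_equal_pendulum := by
  intro x _
  unfold Spec_pendulum
  by_cases hx : x = []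
  · subst hx; decide
  · have hn : 1 ≤ x.length := by
      rcases x with _ | _
      · exact absurd rfl hx
      · simp
    have hy : (PySem.List.sorted x id false).length = x.length :=
      PySem.List.length_sorted x id false
    rw [pendulum]
    show (List.foldl (pendStep (PySem.List.sorted x id false))
        (x, PySem.Int.floordiv ((x.length:Int) - 1) 2)
        (PySem.List.pyRange 1 ((x.length:Int) + 1) 1)).1 = pendulum_alt x
    have hfd : PySem.Int.floordiv ((x.length:Int) - 1) 2 = (((x.length - 1) / 2 : Nat) : Int) := by
      simp [PySem.Int.floordiv, Int.fdiv_eq_ediv]; omega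
    rw [hfd, loop_inv x (PySem.List.sorted x id false) hy hx x.length le_rfl]
    have hlb : lb x.length x.length = 0 := by unfold lb; omega
    rw [hlb]
    simp only [List.take_zero, List.nil_append, Nat.zero_add]
    rw [show (PySem.List.sorted x id false).take x.length = PySem.List.sorted x id false by
          rw [← hy]; exact List.take_length,
        List.drop_length, List.append_nil, pendulum_alt_eq_pend x hx]
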